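-- pv_equiv track=rewrite | github.com/Lightblues/Leetcode | contest/299.py | maximumsSplicedArray
-- ===== SOURCE A (Python) =====
-- from typing import List, Optional, Tuple
--
-- def maximumsSplicedArray(nums1: List[int], nums2: List[int]) -> int:
--     def f(nums1, nums2):
--         diff = list(i-j for i, j in zip(nums1, nums2))
--         minn = 0
--         curr = 0
--         for i in diff:
--             curr += i
--             minn = min(minn, curr)
--             curr = min(curr, 0)
--         return minn
--     return max(
--         sum(nums1) - f(nums1, nums2),
--         sum(nums2) - f(nums2, nums1)
--     )
-- ===== SOURCE B (Python) =====
-- def maximumsSplicedArray(nums1, nums2):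
--     def min_swap_gain(a, b):
--         best = 0
--         pref = 0
--         max_pref = 0
--         for x, y in zip(a, b):
--             pref += x - y
--             if pref - max_pref < best:
--                 best = pref - max_pref
--             if pref > max_pref:
--                 max_pref = pref
--         return best
--     return max(sum(nums1) - min_swap_gain(nums1, nums2),
--                sum(nums2) - min_swap_gain(nums2, nums1))
-- ===== Notes on version B (the rewrite author's own statement) =====
-- stated objective: alternative
-- what changed: Replaces the Kadane reset-at-zero accumulator over an explicitly built diff list with a single prefix-sum pass over zip tracking the running prefix and the maximum prefix seen, taking the minimum of prefix - maxPrefix (bounded by 0 for the empty swap).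
import Mathlib
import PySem

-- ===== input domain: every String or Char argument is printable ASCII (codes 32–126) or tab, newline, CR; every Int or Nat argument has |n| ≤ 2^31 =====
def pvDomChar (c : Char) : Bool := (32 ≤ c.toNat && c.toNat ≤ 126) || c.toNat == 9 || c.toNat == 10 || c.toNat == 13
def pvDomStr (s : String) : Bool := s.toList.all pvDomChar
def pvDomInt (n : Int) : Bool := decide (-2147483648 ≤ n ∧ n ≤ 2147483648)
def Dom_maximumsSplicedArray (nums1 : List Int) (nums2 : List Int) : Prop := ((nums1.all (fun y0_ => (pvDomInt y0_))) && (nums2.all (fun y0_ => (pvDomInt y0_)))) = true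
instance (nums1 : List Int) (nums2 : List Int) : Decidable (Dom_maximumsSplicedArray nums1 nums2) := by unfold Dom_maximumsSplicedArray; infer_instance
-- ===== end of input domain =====

-- B replaces A's Kadane reset-at-zero accumulator over a built diff list with a
-- prefix-sum pass tracking the running prefix and maximum prefix seen (alternative decomposition).


-- ===== PORT A =====
-- inner helper f: builds diff = [i - j for (i,j) in zip], then Kadane-style min with reset at 0
def pvA_f (nums1 : List Int) (nums2 : List Int) : Int :=
  let diff := (List.zip nums1 nums2).map (fun p => p.1 - p.2)
  (diff.foldl (fun (s : Int × Int) i =>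
      let curr := s.2 + i
      let minn := min s.1 curr
      (minn, min curr 0)) (0, 0)).1

def maximumsSplicedArray (nums1 : List Int) (nums2 : List Int) : Int :=
  max (nums1.sum - pvA_f nums1 nums2) (nums2.sum - pvA_f nums2 nums1)

-- ===== PORT B =====
-- min_swap_gain: prefix-sum pass over zip; state (best, pref, max_pref)
def pvB_step (s : Int × Int × Int) (p : Int × Int) : Int × Int × Int :=
  let pref := s.2.1 + (p.1 - p.2)
  let best := if pref - s.2.2 < s.1 then pref - s.2.2 else s.1
  let maxP := if pref > s.2.2 then pref else s.2.2
  (best, pref, maxP)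

def pvB_minSwapGain (a : List Int) (b : List Int) : Int :=
  ((List.zip a b).foldl pvB_step (0, 0, 0)).1

def maximumsSplicedArray_alt (nums1 : List Int) (nums2 : List Int) : Int :=
  max (nums1.sum - pvB_minSwapGain nums1 nums2) (nums2.sum - pvB_minSwapGain nums2 nums1)

-- ===== PRECONDITION & SPEC =====
def Spec_maximumsSplicedArray (nums1 : List Int) (nums2 : List Int) (out : Int) : Prop := out = maximumsSplicedArray_alt nums1 nums2
instance (nums1 : List Int) (nums2 : List Int) (out : Int) : Decidable (Spec_maximumsSplicedArray nums1 nums2 out) := by unfold Spec_maximumsSplicedArray; infer_instance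

-- ===== CLAIM (what is proved, stated in full; the proofs are below) =====
def Claim_equal_maximumsSplicedArray : Prop := ∀ (nums1 : List Int) (nums2 : List Int), Dom_maximumsSplicedArray nums1 nums2 → Spec_maximumsSplicedArray nums1 nums2 (maximumsSplicedArray nums1 nums2)

-- ===== LEMMAS AND PROOFS =====

-- Loop invariant: A's clamped accumulator curr equals B's pref - max_pref, and the
-- two running minima coincide; then the folds agree in their first components.
lemma pv_core (l : List (Int × Int)) :
    ∀ (minn curr pref maxP : Int), curr = pref - maxP →
      (((l.map (fun p => p.1 - p.2)).foldl (fun (s : Int × Int) i =>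
          let curr := s.2 + i
          let minn := min s.1 curr
          (minn, min curr 0)) (minn, curr)).1)
        = ((l.foldl pvB_step (minn, pref, maxP)).1) := by
  induction l with
  | nil => intro minn curr pref maxP h; rfl
  | cons p t ih =>
      intro minn curr pref maxP h
      simp only [List.map_cons, List.foldl_cons, pvB_step]
      have h1 : (if pref + (p.1 - p.2) - maxP < minn then pref + (p.1 - p.2) - maxP else minn)
          = min minn (curr + (p.1 - p.2)) := by subst h; split_ifs <;> omega
      rw [h1]
      exact ih _ _ _ _ (by subst h; split_ifs <;> omega)

lemma pv_f_eq (a b : List Int) : pvA_f a b = pvB_minSwapGain a b := by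
  unfold pvA_f pvB_minSwapGain
  exact pv_core (List.zip a b) 0 0 0 0 (by ring)

-- ===== VERDICT (by name: the statement is the Claim_ definition above) =====
theorem maximumsSplicedArray_spec : Claim_equal_maximumsSplicedArray := by
  intro nums1 nums2 _
  unfold Spec_maximumsSplicedArray maximumsSplicedArray maximumsSplicedArray_alt
  rw [pv_f_eq, pv_f_eq]
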